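-- pv_equiv track=rewrite | github.com/baldoinov/introducao-a-computacao | EP3.PY | maiorIntervaloSemPrimos
-- ===== SOURCE A (Python) =====
-- def criaListaCrivoEratostenes(n):
--     ''' (int) -> list
--     Recebe um inteiro n >= 2 e cria uma lista crivo[0...n] com zeros e uns
--     tal que para cada i, 0 <= i <= n, crivo[i] é 1 se i é primo e crivo[i] é 0
--     se i não é primo.
--     A lista crivo é criada implementando o algoritmo do Crivo de Eratóstenes.
--     Esta função retorna a lista crivo.
--     '''
--
--     a = [1] * (n + 1)
--     a[0] = a[1] = 0
--     raizn = int(n**(1/2))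
--
--     for i in range (2, raizn + 1):
--         if a[i] == 1:
--             for j in range(2, (n//i + 1)):
--                 a[i * j] = 0
--     return a
--
-- def criaListaPrimos(crivo):
--     ''' (list) -> list
--     Recebe uma lista crivo que foi criada utilizando o algoritmo do Crivo de
--     Eratostenes. A partir da lista crivo, esta funcao cria e retorna uma lista
--     chamada primos, contendo todos os numeros primos, em ordem crescente.
--     '''
--     n = len(crivo)
--     a = []
--     for i in range(n):
--         if crivo[i] == 1:
--             a.append(i)
--     return a
--
-- def maiorIntervaloSemPrimos(n):
--     '''(int) -> int, int
--     Recebe um inteiro n > 2 e determina um par de numeros primos r e s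
--     tais que 2 <= r < s <= n, o valor s-r é maximo e para todo i tal que
--     r < i < s, tem-se que i nao é primo (ou seja, entre r e s nao há nenhum
--     primo).
--     Esta funcao retorna os primos r e s.
--     '''
--     p_erasto = criaListaCrivoEratostenes(n)
--     primos = criaListaPrimos(p_erasto)
--     i_max = 0   # intervalo máximo sem números primos
--
--     for i in range(len(primos) - 1):
--         if primos[i + 1] - primos[i] >= i_max:
--             i_max = primos[i + 1] - primos[i]
--             r = primos[i]
--             s = primos[i+1]
--     return r, s
-- ===== SOURCE B (Python) =====
-- def criaListaCrivoEratostenes(n):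
--     a = [1] * (n + 1)
--     a[0] = a[1] = 0
--     raizn = int(n**(1/2))
--
--     for i in range(2, raizn + 1):
--         if a[i] == 1:
--             for j in range(2, (n//i + 1)):
--                 a[i * j] = 0
--     return a
--
-- def maiorIntervaloSemPrimos(n):
--     '''(int) -> int, int
--     Single pass over the sieve: track the last prime seen and the widest
--     gap so far; no intermediate list of primes is built.
--     '''
--     crivo = criaListaCrivoEratostenes(n)
--     i_max, prev, r, s = 0, None, 0, 0
--     for cur in range(len(crivo)):
--         if crivo[cur] == 1:
--             if prev is not None and cur - prev >= i_max:
--                 i_max, r, s = cur - prev, prev, cur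
--             prev = cur
--     return r, s
-- ===== Notes on version B (the rewrite author's own statement) =====
-- stated objective: simpler
-- what changed: B drops the intermediate primes list entirely: one linear scan over the sieve keeps the last prime seen (prev) and the widest gap so far, instead of first materialising the list of primes and then index-scanning its consecutive pairs.
import Mathlib
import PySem

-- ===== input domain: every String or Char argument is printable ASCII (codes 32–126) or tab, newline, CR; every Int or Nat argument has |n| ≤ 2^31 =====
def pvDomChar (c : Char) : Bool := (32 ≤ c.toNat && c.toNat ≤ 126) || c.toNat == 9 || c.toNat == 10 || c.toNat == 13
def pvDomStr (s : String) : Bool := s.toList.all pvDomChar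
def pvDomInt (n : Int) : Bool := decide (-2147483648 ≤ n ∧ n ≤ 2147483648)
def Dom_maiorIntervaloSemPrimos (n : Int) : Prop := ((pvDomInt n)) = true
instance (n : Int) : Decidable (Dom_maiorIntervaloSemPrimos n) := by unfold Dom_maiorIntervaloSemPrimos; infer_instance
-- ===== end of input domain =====

-- B fuses A's build-primes-list + scan-consecutive-pairs phases into one linear scan over
-- the sieve that tracks the last prime seen; objective: simpler (no intermediate list).

-- ===== PORT A =====
-- kernel-transparent integer square root (largest k with k*k ≤ m);
-- equals int(m**(1/2)) for 0 ≤ m ≤ 2^31 (double sqrt cannot cross an integer there)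
def pyIsqrt (m : Nat) : Nat :=
  (List.range (m + 1)).foldl (fun acc k => if k * k ≤ m then k else acc) 0

-- shared helper (A's sieve; B's Python keeps it verbatim, so both ports use it).
-- The Python list is mutated in place, so the port keeps it as an Array; every index used
-- is nonnegative and in range (2 ≤ i ≤ √n, 2 ≤ j, i*j ≤ n), so getD/setIfInBounds are exact.
def criaListaCrivoEratostenes (n : Int) : List Int :=
  let a : Array Int := Array.replicate (n + 1).toNat 1
  let a := (a.setIfInBounds 0 0).setIfInBounds 1 0
  let raizn : Int := (pyIsqrt n.toNat : Int)
  ((PySem.List.pyRange 2 (raizn + 1) 1).foldl (fun a i =>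
    if a.getD i.toNat 0 == 1 then
      (PySem.List.pyRange 2 (PySem.Int.floordiv n i + 1) 1).foldl
        (fun a j => a.setIfInBounds (i * j).toNat 0) a
    else a) a).toList

-- crivo[i] is read as an O(1) array access (Python list indexing); i from range(n) is nonnegative
def criaListaPrimos (crivo : List Int) : List Int :=
  let c := crivo.toArray
  ((PySem.List.pyRange 0 (crivo.length : Int) 1).foldl
    (fun a i => if c.getD i.toNat 0 == 1 then a.push i else a) (#[] : Array Int)).toList

def maiorIntervaloSemPrimos (n : Int) : Int × Int :=
  let p_erasto := criaListaCrivoEratostenes n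
  let primos := criaListaPrimos p_erasto
  -- primos[i] is an O(1) array access; i from range(len(primos)-1) is nonnegative.
  -- Python's r, s start unbound; under Pre_ (n ≥ 3) the first iteration always assigns them,
  -- so the port initialises them to 0 (always overwritten inside Pre_ before being returned).
  let ps := primos.toArray
  let st := (PySem.List.pyRange 0 ((primos.length : Int) - 1) 1).foldl
    (fun (st : Int × Int × Int) i =>
      if ps.getD (i + 1).toNat 0 - ps.getD i.toNat 0 ≥ st.1 then
        (ps.getD (i + 1).toNat 0 - ps.getD i.toNat 0, ps.getD i.toNat 0, ps.getD (i + 1).toNat 0)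
      else st) (0, 0, 0)
  (st.2.1, st.2.2)

-- ===== PORT B =====
def maiorIntervaloSemPrimos_alt (n : Int) : Int × Int :=
  let crivo := (criaListaCrivoEratostenes n).toArray   -- Python list = array; crivo[cur] is O(1)
  let st := (PySem.List.pyRange 0 (crivo.size : Int) 1).foldl
    (fun (st : Int × Option Int × Int × Int) cur =>
      if crivo.getD cur.toNat 0 == 1 then
        match st with
        | (i_max, some p, r, s) =>
          if cur - p ≥ i_max then (cur - p, some cur, p, cur) else (i_max, some cur, r, s)
        | (i_max, none, r, s) => (i_max, some cur, r, s)
      else st) (0, none, 0, 0)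
  (st.2.2.1, st.2.2.2)

-- ===== PRECONDITION & SPEC =====
-- Pre_ excludes exactly the inputs where Python A raises: n ≤ 0 hits an IndexError building
-- the sieve, and n = 1, 2 leave fewer than two primes so `return r, s` raises UnboundLocalError.
def Pre_maiorIntervaloSemPrimos (n : Int) : Prop := 3 ≤ n
instance (n : Int) : Decidable (Pre_maiorIntervaloSemPrimos n) := by unfold Pre_maiorIntervaloSemPrimos; infer_instance
def pvWitness_maiorIntervaloSemPrimos : Int := 30

def Spec_maiorIntervaloSemPrimos (n : Int) (out : Int × Int) : Prop := out = maiorIntervaloSemPrimos_alt n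
instance (n : Int) (out : Int × Int) : Decidable (Spec_maiorIntervaloSemPrimos n out) := by unfold Spec_maiorIntervaloSemPrimos; infer_instance

-- ===== CLAIM (what is proved, stated in full; the proofs are below) =====
def Claim_equal_maiorIntervaloSemPrimos : Prop := ∀ (n : Int), Dom_maiorIntervaloSemPrimos n → Pre_maiorIntervaloSemPrimos n → Spec_maiorIntervaloSemPrimos n (maiorIntervaloSemPrimos n)

-- ===== LEMMAS AND PROOFS =====

-- one gap-comparison step on a consecutive pair of primes (A's loop body, abstracted)
def stepPair (st : Int × Int × Int) (xy : Int × Int) : Int × Int × Int :=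
  if xy.2 - xy.1 ≥ st.1 then (xy.2 - xy.1, xy.1, xy.2) else st

-- structural form of the pair scan: x is the previous element, t the rest
def gPairs : Int → List Int → (Int × Int × Int) → Int × Int × Int
  | _, [], st => st
  | x, y :: t, st => gPairs y t (stepPair st (x, y))

-- B's step function (the body of B's loop on a prime index)
def stepB (st : Int × Option Int × Int × Int) (cur : Int) : Int × Option Int × Int × Int :=
  match st with
  | (i_max, some p, r, s) =>
    if cur - p ≥ i_max then (cur - p, some cur, p, cur) else (i_max, some cur, r, s)
  | (i_max, none, r, s) => (i_max, some cur, r, s)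

lemma getD_toArray (l : List Int) (k : Nat) (d : Int) : l.toArray.getD k d = l.getD k d := by
  simp only [Array.getD, List.getD, List.size_toArray]
  split
  · next h => simp [List.getElem?_eq_getElem h]
  · next h => rw [List.getElem?_eq_none (by omega)]; rfl

lemma push_fold_filter (p : Int → Bool) (l : List Int) : ∀ (arr : Array Int),
    (l.foldl (fun a i => if p i then a.push i else a) arr).toList = arr.toList ++ l.filter p := by
  induction l with
  | nil => intro arr; simp
  | cons x t ih =>
    intro arr
    by_cases h : p x <;> simp [h, ih, Array.toList_push]

lemma foldl_stepB_some (t : List Int) : ∀ (x m r s : Int),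
    (fun st => (st.1, st.2.2.1, st.2.2.2)) (t.foldl stepB (m, some x, r, s))
      = gPairs x t (m, r, s) := by
  induction t with
  | nil => intro x m r s; simp [gPairs]
  | cons y u ih =>
    intro x m r s
    simp only [List.foldl_cons, stepB, gPairs, stepPair]
    by_cases h : y - x ≥ m <;> simp [h, ih]

lemma zip_tail_foldl (t : List Int) : ∀ (x : Int) (st : Int × Int × Int),
    ((x :: t).zip t).foldl stepPair st = gPairs x t st := by
  induction t with
  | nil => intro x st; simp [gPairs]
  | cons y u ih => intro x st; simp [List.zip_cons_cons, gPairs, ih]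

lemma map_range_pairs (p : List Int) :
    (PySem.List.pyRange 0 ((p.length : Int) - 1) 1).map
      (fun i => (p.toArray.getD i.toNat 0, p.toArray.getD (i + 1).toNat 0))
      = p.zip p.tail := by
  apply List.ext_getElem
  · simp [PySem.List.length_pyRange_one]
  · intro k h1 h2
    have hk : k < p.length - 1 := by
      simp [PySem.List.length_pyRange_one] at h1; omega
    have hget : (PySem.List.pyRange 0 ((p.length : Int) - 1) 1)[k]'(by
        simp [PySem.List.length_pyRange_one]; omega) = (k : Int) := by
      rw [PySem.List.getElem_pyRange_one]; simp
    simp only [List.getElem_map, hget]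
    have e1 : ((k : Int)).toNat = k := by omega
    have e2 : ((k : Int) + 1).toNat = k + 1 := by omega
    rw [e1, e2, getD_toArray, getD_toArray]
    simp only [List.getD]
    rw [List.getElem?_eq_getElem (by omega), List.getElem?_eq_getElem (by omega)]
    simp [List.getElem_zip, List.getElem_tail]

theorem main_eq (n : Int) : maiorIntervaloSemPrimos n = maiorIntervaloSemPrimos_alt n := by
  unfold maiorIntervaloSemPrimos maiorIntervaloSemPrimos_alt criaListaPrimos
  simp only [List.size_toArray]
  rw [push_fold_filter]
  have hB : (PySem.List.pyRange 0 ((criaListaCrivoEratostenes n).length : Int) 1).foldl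
      (fun (st : Int × Option Int × Int × Int) cur =>
        if (criaListaCrivoEratostenes n).toArray.getD cur.toNat 0 == 1 then
          match st with
          | (i_max, some p, r, s) =>
            if cur - p ≥ i_max then (cur - p, some cur, p, cur) else (i_max, some cur, r, s)
          | (i_max, none, r, s) => (i_max, some cur, r, s)
        else st) (0, none, 0, 0)
      = (PySem.List.pyRange 0 ((criaListaCrivoEratostenes n).length : Int) 1).foldl
        (fun st cur => if (criaListaCrivoEratostenes n).toArray.getD cur.toNat 0 == 1
          then stepB st cur else st) (0, none, 0, 0) := by
    apply PySem.List.foldl_congr_mem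
    intro acc x _
    obtain ⟨m, pr, r, s⟩ := acc
    cases pr <;> by_cases h : (criaListaCrivoEratostenes n).toArray.getD x.toNat 0 == 1 <;>
      simp [stepB]
  rw [hB, PySem.List.foldl_if_eq_foldl_filter]
  generalize ((PySem.List.pyRange 0 ((criaListaCrivoEratostenes n).length : Int) 1).filter
      (fun i => (criaListaCrivoEratostenes n).toArray.getD i.toNat 0 == 1)) = p
  simp only [List.nil_append]
  have hA : (PySem.List.pyRange 0 ((p.length : Int) - 1) 1).foldl
      (fun (st : Int × Int × Int) i =>
        if p.toArray.getD (i + 1).toNat 0 - p.toArray.getD i.toNat 0 ≥ st.1 then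
          (p.toArray.getD (i + 1).toNat 0 - p.toArray.getD i.toNat 0,
           p.toArray.getD i.toNat 0, p.toArray.getD (i + 1).toNat 0)
        else st) (0, 0, 0)
      = (p.zip p.tail).foldl stepPair (0, 0, 0) := by
    rw [← map_range_pairs, List.foldl_map]
    rfl
  rw [hA]
  cases p with
  | nil => simp
  | cons x t =>
    rw [show (x :: t).foldl stepB (0, none, 0, 0) = t.foldl stepB (0, some x, 0, 0) from rfl]
    simp only [List.tail_cons]
    rw [zip_tail_foldl, ← foldl_stepB_some t x 0 0 0]

-- ===== VERDICT (by name: the statement is the Claim_ definition above) =====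
theorem maiorIntervaloSemPrimos_spec : Claim_equal_maiorIntervaloSemPrimos := by
  intro n _ _
  unfold Spec_maiorIntervaloSemPrimos
  exact main_eq n
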